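-- pv_equiv track=rewrite | github.com/JoshuaZaneBarsky/Chess | Piece.py | fill_right_of_piece
-- ===== SOURCE A (Python) =====
-- BOARD_SIZE = 8
--
-- def fill_right_of_piece(piece_pos, current_piece_legal_moves) -> list:
--     for i in range(BOARD_SIZE):
--         for j in range(BOARD_SIZE):
--             if i != piece_pos[0]:
--                 pass
--             if i == piece_pos[0] and j > piece_pos[1]:
--                 current_piece_legal_moves[i][j] = 1
--     return current_piece_legal_moves
-- ===== SOURCE B (Python) =====
-- BOARD_SIZE = 8
--
-- def fill_right_of_piece(piece_pos, current_piece_legal_moves) -> list: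
--     # Same in-place mutation as the original; guard the row, then one pass
--     # over just the cells strictly right of the piece.
--     r = piece_pos[0]
--     c = piece_pos[1]
--     if 0 <= r < BOARD_SIZE:
--         for j in range(max(0, c + 1), BOARD_SIZE):
--             current_piece_legal_moves[r][j] = 1
--     return current_piece_legal_moves
-- ===== Notes on version B (the rewrite author's own statement) =====
-- stated objective: simpler
-- what changed: Replaces the full 8x8 double scan (with a dead 'pass' branch) by a row-bound guard and a single loop over only the cells strictly right of the piece.
import Mathlib
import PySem

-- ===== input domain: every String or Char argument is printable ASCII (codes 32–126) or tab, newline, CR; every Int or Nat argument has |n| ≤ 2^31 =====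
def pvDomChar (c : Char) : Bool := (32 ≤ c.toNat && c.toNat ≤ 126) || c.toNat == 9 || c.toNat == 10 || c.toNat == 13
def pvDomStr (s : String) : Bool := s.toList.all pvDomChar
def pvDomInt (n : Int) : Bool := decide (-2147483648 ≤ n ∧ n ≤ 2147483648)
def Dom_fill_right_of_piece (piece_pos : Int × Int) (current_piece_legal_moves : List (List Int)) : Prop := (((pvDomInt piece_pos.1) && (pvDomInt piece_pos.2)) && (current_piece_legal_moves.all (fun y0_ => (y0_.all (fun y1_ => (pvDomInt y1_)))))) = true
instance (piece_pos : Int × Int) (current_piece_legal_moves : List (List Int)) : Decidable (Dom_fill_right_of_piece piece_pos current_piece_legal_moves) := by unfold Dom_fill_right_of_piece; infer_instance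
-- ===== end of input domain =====

-- B replaces the full 8x8 double scan by a row guard and one pass over the cells
-- right of the piece; both mutate the argument in Python, and the equivalence
-- proved here is about the return value.

-- ===== PORT A =====
-- m[i][j] = v for nonneg in-range i, j (Pre_ guarantees in range)
def pvSetCell (m : List (List Int)) (i j : Nat) (v : Int) : List (List Int) :=
  m.set i ((m.getD i []).set j v)

def fill_right_of_piece (piece_pos : Int × Int) (current_piece_legal_moves : List (List Int)) : List (List Int) :=
  -- for i in range(8): for j in range(8): (dead 'if i != piece_pos[0]: pass');
  --   if i == piece_pos[0] and j > piece_pos[1]: m[i][j] = 1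
  (PySem.List.pyRange 0 8 1).foldl (fun acc i =>
    (PySem.List.pyRange 0 8 1).foldl (fun acc2 j =>
      if i = piece_pos.1 ∧ j > piece_pos.2 then pvSetCell acc2 i.toNat j.toNat 1 else acc2) acc)
    current_piece_legal_moves

-- ===== PORT B =====
def fill_right_of_piece_alt (piece_pos : Int × Int) (current_piece_legal_moves : List (List Int)) : List (List Int) :=
  if 0 ≤ piece_pos.1 ∧ piece_pos.1 < 8 then
    (PySem.List.pyRange (max 0 (piece_pos.2 + 1)) 8 1).foldl
      (fun acc j => pvSetCell acc piece_pos.1.toNat j.toNat 1) current_piece_legal_moves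
  else current_piece_legal_moves

-- ===== PRECONDITION & SPEC =====
-- Pre_ excludes exactly the inputs where Python A raises IndexError: a row index in
-- 0..7 with some column to fill (piece_pos[1] < 7) but the board too small for the
-- assignments (row missing, or that row shorter than 8).
def Pre_fill_right_of_piece (piece_pos : Int × Int) (current_piece_legal_moves : List (List Int)) : Prop :=
  (0 ≤ piece_pos.1 ∧ piece_pos.1 < 8 ∧ piece_pos.2 < 7) →
    (piece_pos.1.toNat < current_piece_legal_moves.length ∧
     8 ≤ (current_piece_legal_moves.getD piece_pos.1.toNat []).length)
instance (piece_pos : Int × Int) (current_piece_legal_moves : List (List Int)) : Decidable (Pre_fill_right_of_piece piece_pos current_piece_legal_moves) := by unfold Pre_fill_right_of_piece; infer_instance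
def pvWitness_fill_right_of_piece : (Int × Int) × List (List Int) :=
  ((2, 3), [[0,0,0,0,0,0,0,0],[0,0,0,0,0,0,0,0],[0,0,0,0,0,0,0,0],[0,0,0,0,0,0,0,0],
            [0,0,0,0,0,0,0,0],[0,0,0,0,0,0,0,0],[0,0,0,0,0,0,0,0],[0,0,0,0,0,0,0,0]])

def Spec_fill_right_of_piece (piece_pos : Int × Int) (current_piece_legal_moves : List (List Int)) (out : List (List Int)) : Prop := out = fill_right_of_piece_alt piece_pos current_piece_legal_moves
instance (piece_pos : Int × Int) (current_piece_legal_moves : List (List Int)) (out : List (List Int)) : Decidable (Spec_fill_right_of_piece piece_pos current_piece_legal_moves out) := by unfold Spec_fill_right_of_piece; infer_instance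

-- ===== CLAIM (what is proved, stated in full; the proofs are below) =====
def Claim_equal_fill_right_of_piece : Prop := ∀ (piece_pos : Int × Int) (current_piece_legal_moves : List (List Int)), Dom_fill_right_of_piece piece_pos current_piece_legal_moves → Pre_fill_right_of_piece piece_pos current_piece_legal_moves → Spec_fill_right_of_piece piece_pos current_piece_legal_moves (fill_right_of_piece piece_pos current_piece_legal_moves)

-- ===== LEMMAS AND PROOFS =====

-- a fold whose step fixes every element of the list is the identity
theorem pvFoldlFix {α : Type} (F : α → Int → α) (l : List Int)
    (h : ∀ i ∈ l, ∀ acc, F acc i = acc) (init : α) : l.foldl F init = init := by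
  induction l generalizing init with
  | nil => rfl
  | cons x xs ih =>
    rw [List.foldl_cons, h x List.mem_cons_self init]
    exact ih (fun i hi acc => h i (List.mem_cons_of_mem _ hi) acc) init

-- a fold over 0..7 whose step fixes every index except r collapses to the single step at r
theorem pvFoldlSingle {α : Type} (F : α → Int → α) (r : Int) (h0 : 0 ≤ r) (h8 : r < 8)
    (hne : ∀ i : Int, i ≠ r → ∀ acc, F acc i = acc) (init : α) :
    (PySem.List.pyRange 0 8 1).foldl F init = F init r := by
  rw [PySem.List.pyRange_one_append 0 r 8 h0 (le_of_lt h8),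
      PySem.List.pyRange_one_cons h8, List.foldl_append, List.foldl_cons]
  rw [pvFoldlFix F (PySem.List.pyRange 0 r 1)
      (fun i hi acc => hne i
        (by obtain ⟨h1, h2⟩ := PySem.List.mem_pyRange_one.1 hi; omega) acc)]
  exact pvFoldlFix F (PySem.List.pyRange (r + 1) 8 1)
    (fun i hi acc => hne i
      (by obtain ⟨h1, h2⟩ := PySem.List.mem_pyRange_one.1 hi; omega) acc) (F init r)

-- A's inner row loop is a no-op when the outer row index differs from the piece's row
theorem pvInnerNe (r c i : Int) (hi : i ≠ r) (acc : List (List Int)) :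
    (PySem.List.pyRange 0 8 1).foldl
      (fun acc2 j => if i = r ∧ j > c then pvSetCell acc2 i.toNat j.toNat 1 else acc2) acc = acc :=
  pvFoldlFix _ _ (fun _ _ acc2 => if_neg (fun hcon => hi hcon.1)) acc

-- A's inner row loop is a no-op when the piece is at or right of the last column (c ≥ 7)
theorem pvInnerBig (r c i : Int) (hc : 7 ≤ c) (acc : List (List Int)) :
    (PySem.List.pyRange 0 8 1).foldl
      (fun acc2 j => if i = r ∧ j > c then pvSetCell acc2 i.toNat j.toNat 1 else acc2) acc = acc :=
  pvFoldlFix _ _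
    (fun x hx acc2 => by
      obtain ⟨hx1, hx2⟩ := PySem.List.mem_pyRange_one.1 hx
      exact if_neg (by omega)) acc

-- on the piece's row, A's conditional scan over 0..7 equals B's plain scan over max(0,c+1)..7
theorem pvInnerEq (r c : Int) (hc : c < 7) (acc : List (List Int)) :
    (PySem.List.pyRange 0 8 1).foldl
      (fun acc2 j => if r = r ∧ j > c then pvSetCell acc2 r.toNat j.toNat 1 else acc2) acc
    = (PySem.List.pyRange (max 0 (c + 1)) 8 1).foldl
        (fun a j => pvSetCell a r.toNat j.toNat 1) acc := by
  have h1 : (0:Int) ≤ max 0 (c + 1) := le_max_left _ _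
  have h2 : max 0 (c + 1) ≤ 8 := by omega
  rw [PySem.List.pyRange_one_append 0 (max 0 (c + 1)) 8 h1 h2, List.foldl_append]
  rw [pvFoldlFix _ (PySem.List.pyRange 0 (max 0 (c + 1)) 1)
      (fun x hx acc2 => by
        obtain ⟨hx1, hx2⟩ := PySem.List.mem_pyRange_one.1 hx
        exact if_neg (by omega)) acc]
  exact PySem.List.foldl_congr_mem _ _ _ _
    (by intro acc2 x hx
        obtain ⟨hx1, hx2⟩ := PySem.List.mem_pyRange_one.1 hx
        exact if_pos ⟨rfl, by omega⟩)

-- ===== VERDICT (by name: the statement is the Claim_ definition above) =====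
theorem fill_right_of_piece_spec : Claim_equal_fill_right_of_piece := by
  intro pp cpm _ _
  obtain ⟨r, c⟩ := pp
  unfold Spec_fill_right_of_piece fill_right_of_piece fill_right_of_piece_alt
  dsimp only
  by_cases hr : 0 ≤ r ∧ r < 8
  · rw [if_pos hr]
    obtain ⟨h0, h8⟩ := hr
    by_cases hc : c < 7
    · exact (pvFoldlSingle
        (fun acc i => (PySem.List.pyRange 0 8 1).foldl
          (fun acc2 j => if i = r ∧ j > c then pvSetCell acc2 i.toNat j.toNat 1 else acc2) acc)
        r h0 h8 (fun i hi acc => pvInnerNe r c i hi acc) cpm).trans (pvInnerEq r c hc cpm)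
    · rw [PySem.List.pyRange_one_eq_nil (a := max 0 (c + 1)) (b := 8) (by omega)]
      exact pvFoldlFix _ _ (fun i _ acc => pvInnerBig r c i (by omega) acc) cpm
  · rw [if_neg hr]
    exact pvFoldlFix _ _
      (fun i hi acc => pvInnerNe r c i
        (by obtain ⟨h1, h2⟩ := PySem.List.mem_pyRange_one.1 hi; omega) acc) cpm
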